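-- pv_equiv track=rewrite | github.com/uday1331/advent_of_code_2023 | solutions/day_5/day5.py | map_ranges
-- ===== SOURCE A (Python) =====
-- def source_to_destination(source_start, destination_start, input):
--     return destination_start + (input - source_start)
--
-- def split_by_intersection(interval1, interval2):
--     intersection = max(interval1[0], interval2[0]), min(interval1[1], interval2[1])
--
--     remainder = []
--     if intersection[0] != interval1[0]:
--         remainder.append((interval1[0], intersection[0] - 1))
--     if intersection[1] != interval1[1]:
--         remainder.append((intersection[1] + 1, interval1[1]))
--
--     return (intersection[0], intersection[1]), remainder
--
-- def intersects(interval1, interval2):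
--     return max(interval1[0], interval2[0]) <= min(interval1[1], interval2[1])
--
-- def map_ranges(map, unmapped):
--     mapped = []
--
--     while unmapped:
--         current_range = unmapped.pop()
--
--         match_source, match_destination = next((item for item in map.items() if intersects(current_range, item[0])), (None, None))
--         if not match_source:
--             mapped.append(current_range)
--             continue
--
--         intersection, remainder = split_by_intersection(current_range, match_source)
--         destination_interval = (source_to_destination(match_source[0], match_destination[0], intersection[0]),
--                                 source_to_destination(match_source[0], match_destination[0], intersection[1]))
--
--         mapped.append(destination_interval)
--         unmapped.extend(remainder)
--
--     return mapped
-- ===== SOURCE B (Python) =====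
-- def map_one(map, interval):
--     for src, dst in map.items():
--         lo = max(interval[0], src[0])
--         hi = min(interval[1], src[1])
--         if lo <= hi:
--             out = [(dst[0] + (lo - src[0]), dst[0] + (hi - src[0]))]
--             if hi != interval[1]:
--                 out += map_one(map, (hi + 1, interval[1]))
--             if lo != interval[0]:
--                 out += map_one(map, (interval[0], lo - 1))
--             return out
--     return [interval]
--
-- def map_ranges(map, unmapped):
--     mapped = []
--     while unmapped:
--         mapped.extend(map_one(map, unmapped.pop()))
--     return mapped
-- ===== Notes on version B (the rewrite author's own statement) =====
-- stated objective: alternative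
-- what changed: Replaces the explicit worklist stack (pop, remap intersection, push remainders back) with direct recursion over interval splitting: map_one maps one interval completely, recursing on the right then left remainder, and map_ranges just concatenates map_one of each pending interval from the end.
import Mathlib
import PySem

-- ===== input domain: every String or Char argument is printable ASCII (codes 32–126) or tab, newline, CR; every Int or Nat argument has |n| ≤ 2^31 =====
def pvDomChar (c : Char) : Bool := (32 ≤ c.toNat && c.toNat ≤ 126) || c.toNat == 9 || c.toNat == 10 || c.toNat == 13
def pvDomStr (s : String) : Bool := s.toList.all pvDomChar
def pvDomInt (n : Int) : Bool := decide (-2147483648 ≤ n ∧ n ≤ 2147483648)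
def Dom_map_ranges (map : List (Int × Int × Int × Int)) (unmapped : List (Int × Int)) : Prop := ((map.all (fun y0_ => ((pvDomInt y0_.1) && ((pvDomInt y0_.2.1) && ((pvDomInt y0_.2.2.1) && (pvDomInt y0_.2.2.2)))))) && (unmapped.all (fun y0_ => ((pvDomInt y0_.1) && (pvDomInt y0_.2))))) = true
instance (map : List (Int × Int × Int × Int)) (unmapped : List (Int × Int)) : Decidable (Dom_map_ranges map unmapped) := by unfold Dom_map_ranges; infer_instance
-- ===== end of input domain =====

-- B replaces A's explicit worklist stack by direct recursion over interval splitting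
-- (map_one maps one interval completely, right remainder before left); equal return values —
-- both Pythons also empty `unmapped` in place, so the side effect matches too.
-- Both ports carry a Nat fuel that only makes the recursion total: it is chosen from the
-- interval lengths so that it never runs out (proved in the lemmas below).

-- interval-length measure, used only to choose the fuel of both ports
def pvIvLen (iv : Int × Int) : Nat := (iv.2 - iv.1 + 1).toNat
def pvStackLen (s : List (Int × Int)) : Nat := (s.map pvIvLen).sum

-- ===== PORT A =====
-- A's `while unmapped` loop over the mutable list; the Python list is represented top-first
-- (head = Python's last element, so `pop()` = take head and `extend(rem)` = push rem reversed).
def map_ranges_go (map : List (Int × Int × Int × Int)) (fuel : Nat) (stack mapped : List (Int × Int)) : List (Int × Int) :=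
  match fuel, stack with
  | _, [] => mapped
  | 0, _ => mapped        -- fuel exhausted: unreachable for the fuel map_ranges supplies
  | fuel + 1, cur :: rest =>
    -- next((item for item in map.items() if intersects(current_range, item[0])), (None, None))
    match map.find? (fun e => decide (max cur.1 e.1 ≤ min cur.2 e.2.1)) with
    | none => map_ranges_go map fuel rest (mapped ++ [cur])     -- mapped.append(current_range)
    | some e =>
      -- split_by_intersection(current_range, match_source)
      let i0 := max cur.1 e.1
      let i1 := min cur.2 e.2.1
      let dest := (e.2.2.1 + (i0 - e.1), e.2.2.1 + (i1 - e.1))  -- source_to_destination at both ends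
      let rem := (if i0 ≠ cur.1 then [(cur.1, i0 - 1)] else []) ++
                 (if i1 ≠ cur.2 then [(i1 + 1, cur.2)] else [])
      map_ranges_go map fuel (rem.reverse ++ rest) (mapped ++ [dest])

def map_ranges (map : List (Int × Int × Int × Int)) (unmapped : List (Int × Int)) : List (Int × Int) :=
  map_ranges_go map (2 * pvStackLen unmapped.reverse + unmapped.reverse.length) unmapped.reverse []

-- ===== PORT B =====
-- map_one(map, interval): first intersecting entry maps the intersection; recurse on the
-- right remainder, then the left remainder.
def pvMapOne (map : List (Int × Int × Int × Int)) (fuel : Nat) (iv : Int × Int) : List (Int × Int) :=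
  match fuel with
  | 0 => [iv]             -- fuel exhausted: unreachable for the fuel supplied below
  | fuel + 1 =>
    match map.find? (fun e => decide (max iv.1 e.1 ≤ min iv.2 e.2.1)) with
    | none => [iv]
    | some e =>
      let lo := max iv.1 e.1
      let hi := min iv.2 e.2.1
      [(e.2.2.1 + (lo - e.1), e.2.2.1 + (hi - e.1))] ++
        (if hi ≠ iv.2 then pvMapOne map fuel (hi + 1, iv.2) else []) ++
        (if lo ≠ iv.1 then pvMapOne map fuel (iv.1, lo - 1) else [])

-- while unmapped: mapped.extend(map_one(map, unmapped.pop()))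
def map_ranges_alt (map : List (Int × Int × Int × Int)) (unmapped : List (Int × Int)) : List (Int × Int) :=
  unmapped.reverse.foldl (fun acc iv => acc ++ pvMapOne map (pvIvLen iv + 1) iv) []

-- ===== PRECONDITION & SPEC =====
def Spec_map_ranges (map : List (Int × Int × Int × Int)) (unmapped : List (Int × Int)) (out : List (Int × Int)) : Prop := out = map_ranges_alt map unmapped
instance (map : List (Int × Int × Int × Int)) (unmapped : List (Int × Int)) (out : List (Int × Int)) : Decidable (Spec_map_ranges map unmapped out) := by unfold Spec_map_ranges; infer_instance

-- ===== CLAIM (what is proved, stated in full; the proofs are below) =====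
def Claim_equal_map_ranges : Prop := ∀ (map : List (Int × Int × Int × Int)) (unmapped : List (Int × Int)), Dom_map_ranges map unmapped → Spec_map_ranges map unmapped (map_ranges map unmapped)

-- ===== LEMMAS AND PROOFS =====

-- an entry found by the intersection search really intersects
theorem pvFindLe {a b : Int} {m : List (Int × Int × Int × Int)} {e : Int × Int × Int × Int}
    (h : List.find? (fun e => decide (max a e.1 ≤ min b e.2.1)) m = some e) :
    max a e.1 ≤ min b e.2.1 := by
  have := List.find?_some h; simpa using this

-- pvMapOne does not depend on the fuel once the fuel exceeds the interval length
theorem pvMapOne_fuel (m : List (Int × Int × Int × Int)) :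
    ∀ (f1 : Nat) (f2 : Nat) (iv : Int × Int), pvIvLen iv < f1 → pvIvLen iv < f2 →
      pvMapOne m f1 iv = pvMapOne m f2 iv := by
  intro f1
  induction f1 with
  | zero => intro f2 iv h1; omega
  | succ f1 ih =>
    intro f2 iv h1 h2
    obtain ⟨f2', rfl⟩ : ∃ f2', f2 = f2' + 1 := ⟨f2 - 1, by omega⟩
    rw [pvMapOne, pvMapOne]
    cases hf : m.find? (fun e => decide (max iv.1 e.1 ≤ min iv.2 e.2.1)) with
    | none => rfl
    | some e =>
      have hle := pvFindLe hf
      have hR : min iv.2 e.2.1 ≠ iv.2 → pvIvLen (min iv.2 e.2.1 + 1, iv.2) < pvIvLen iv := by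
        intro hc; unfold pvIvLen at *; omega
      have hL : max iv.1 e.1 ≠ iv.1 → pvIvLen (iv.1, max iv.1 e.1 - 1) < pvIvLen iv := by
        intro hc; unfold pvIvLen at *; omega
      simp only
      split_ifs with hc1 hc2 hc2
      · rw [ih f2' _ (by have := hR hc1; omega) (by have := hR hc1; omega),
            ih f2' _ (by have := hL hc2; omega) (by have := hL hc2; omega)]
      · rw [ih f2' _ (by have := hR hc1; omega) (by have := hR hc1; omega)]
      · rw [ih f2' _ (by have := hL hc2; omega) (by have := hL hc2; omega)]
      · rfl

-- A's loop is `mapped ++` the concatenation of map_one over the stack, for any sufficient fuel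
theorem map_ranges_go_eq (m : List (Int × Int × Int × Int)) :
    ∀ (fuel : Nat) (stack mapped : List (Int × Int)),
      2 * pvStackLen stack + stack.length ≤ fuel →
      map_ranges_go m fuel stack mapped =
        mapped ++ stack.flatMap (fun iv => pvMapOne m (pvIvLen iv + 1) iv) := by
  intro fuel
  induction fuel with
  | zero =>
    intro stack mapped hf
    cases stack with
    | nil => simp [map_ranges_go]
    | cons cur rest => simp at hf
  | succ fuel ih =>
    intro stack mapped hf
    cases stack with
    | nil => simp [map_ranges_go]
    | cons cur rest =>
      rw [map_ranges_go]
      cases hfind : m.find? (fun e => decide (max cur.1 e.1 ≤ min cur.2 e.2.1)) with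
      | none =>
        rw [ih rest (mapped ++ [cur])
          (by simp only [pvStackLen, List.map_cons, List.sum_cons, List.length_cons] at hf ⊢; omega)]
        have hone : pvMapOne m (pvIvLen cur + 1) cur = [cur] := by
          rw [pvMapOne, hfind]
        simp [hone]
      | some e =>
        have hle := pvFindLe hfind
        simp only
        rw [ih _ _ (by
          simp only [pvStackLen, List.map_append, List.map_reverse, List.sum_append,
            List.sum_reverse, List.map_cons, List.sum_cons, List.length_append,
            List.length_reverse, List.length_cons] at hf ⊢
          unfold pvIvLen at *
          split_ifs <;> simp_all <;> omega)]
        have hone : pvMapOne m (pvIvLen cur + 1) cur =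
            (e.2.2.1 + (max cur.1 e.1 - e.1), e.2.2.1 + (min cur.2 e.2.1 - e.1)) ::
              ((if min cur.2 e.2.1 ≠ cur.2 then
                  pvMapOne m (pvIvLen (min cur.2 e.2.1 + 1, cur.2) + 1) (min cur.2 e.2.1 + 1, cur.2) else []) ++
               (if max cur.1 e.1 ≠ cur.1 then
                  pvMapOne m (pvIvLen (cur.1, max cur.1 e.1 - 1) + 1) (cur.1, max cur.1 e.1 - 1) else [])) := by
          rw [pvMapOne, hfind]
          simp only [List.cons_append]
          congr 1
          congr 1
          · split_ifs with hc
            · exact pvMapOne_fuel m _ _ _ (by unfold pvIvLen at *; omega) (by omega)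
            · rfl
          · split_ifs with hc
            · exact pvMapOne_fuel m _ _ _ (by unfold pvIvLen at *; omega) (by omega)
            · rfl
        simp only [List.flatMap_cons, hone, List.flatMap_append, List.flatMap_reverse]
        split_ifs <;> simp [List.flatMap_cons]

theorem map_ranges_eq_alt (map : List (Int × Int × Int × Int)) (unmapped : List (Int × Int)) :
    map_ranges map unmapped = map_ranges_alt map unmapped := by
  unfold map_ranges map_ranges_alt
  rw [map_ranges_go_eq map _ _ _ (le_refl _), PySem.List.foldl_append_eq_flatMap]

-- ===== VERDICT (by name: the statement is the Claim_ definition above) =====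
theorem map_ranges_spec : Claim_equal_map_ranges := by
  intro map unmapped _
  exact map_ranges_eq_alt map unmapped
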